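-- pv_equiv track=rewrite | github.com/fin-vermehr/twitter-ideas-spread | test2.py | virtual_documents
-- ===== SOURCE A (Python) =====
-- def virtual_documents(tweets, hashtags):
--     '''
--     @type tweets: list
--     @type hashtags: list
--     @type virtual (output):dictionnary
--     Assumption: All hashtags found in @tweets are in the set @hashtags.
--     Given a set of tweets and hashtags create a virtual document
--     '''
--     virtual = dict()
--
--     for h in hashtags:
--         virtual[h] =[]
--     for t in tweets:
--         if '#' in t:
--             for h in hashtags:
--                 if h in t:
--
--                     virtual[h].append(t)
--                 else:
--                     pass
--         else:
--             pass
--     return virtual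
-- ===== SOURCE B (Python) =====
-- def _matches(t, lengths, tagset):
--     # all distinct hashtag-substrings of t, found by set lookup of every
--     # substring of t whose length is a hashtag length
--     n = len(t)
--     matched = set()
--     for i in range(n):
--         for L in lengths:
--             if i + L <= n and t[i:i + L] in tagset:
--                 matched.add(t[i:i + L])
--     return matched
--
-- def virtual_documents(tweets, hashtags):
--     tagset = set(hashtags)
--     lengths = list(dict.fromkeys(len(h) for h in hashtags))
--     virtual = {h: [] for h in hashtags}
--     for t in tweets:
--         if '#' in t:
--             for h in _matches(t, lengths, tagset):
--                 virtual[h].append(t)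
--     return virtual
-- ===== Notes on version B (the rewrite author's own statement) =====
-- stated objective: alternative
-- what changed: A scans the whole hashtag list inside every '#'-tweet; B instead hashes the hashtags into a set once, and per tweet enumerates the substrings of each hashtag length at every position, collecting the matching hashtags by set lookup, so the per-tweet loop over the hashtag list disappears.
-- outside the precondition, e.g. on virtual_documents(['#a'], ['a', 'a']): A returns {'a': ['#a', '#a']}, B returns {'a': ['#a']}
import Mathlib
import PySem

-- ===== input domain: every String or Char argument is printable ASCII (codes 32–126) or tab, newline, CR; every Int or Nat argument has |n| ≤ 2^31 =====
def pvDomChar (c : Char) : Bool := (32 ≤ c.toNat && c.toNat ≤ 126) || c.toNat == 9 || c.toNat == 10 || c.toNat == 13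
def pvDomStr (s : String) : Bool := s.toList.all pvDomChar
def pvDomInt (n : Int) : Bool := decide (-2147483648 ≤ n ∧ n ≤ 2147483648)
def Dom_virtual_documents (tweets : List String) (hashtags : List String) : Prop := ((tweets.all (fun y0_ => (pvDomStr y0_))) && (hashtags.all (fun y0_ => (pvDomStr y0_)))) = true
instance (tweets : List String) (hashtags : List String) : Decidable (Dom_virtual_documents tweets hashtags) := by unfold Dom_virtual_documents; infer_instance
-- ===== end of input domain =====

-- B replaces A's per-tweet scan of the hashtag list by a hashtag set plus per-position substring lookup; equal return value on duplicate-free hashtag lists.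


-- ===== PORT A =====
def virtual_documents (tweets : List String) (hashtags : List String) : List (String × List String) :=
  let virtual0 : PySem.Dict String (List String) :=
    hashtags.foldl (fun d h => d.insert h []) PySem.Dict.empty
  let virtual :=
    tweets.foldl (fun d t =>
      if PySem.Str.isIn "#" t then
        hashtags.foldl (fun d h =>
          if PySem.Str.isIn h t then d.modify h [] (fun v => v ++ [t]) else d) d
      else d) virtual0
  virtual.items

-- ===== PORT B =====
-- Source B's helper _matches: all distinct hashtag-substrings of t, by set lookup of
-- every substring of t whose length is a hashtag length
def pvMatches (t : String) (lengths : List Int) (tagset : PySem.Set String) : PySem.Set String :=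
  let n := PySem.Str.len t
  (PySem.List.pyRange 0 n 1).foldl (fun matched i =>
    lengths.foldl (fun matched L =>
      if i + L ≤ n ∧ PySem.Set.contains tagset (PySem.Str.slice t (some i) (some (i + L))) = true
      then PySem.Set.add matched (PySem.Str.slice t (some i) (some (i + L)))
      else matched) matched) PySem.Set.empty

def virtual_documents_alt (tweets : List String) (hashtags : List String) : List (String × List String) :=
  let tagset : PySem.Set String := PySem.Set.ofList hashtags
  let lengths : List Int := PySem.List.dedup (hashtags.map PySem.Str.len)
  let virtual0 : PySem.Dict String (List String) :=
    hashtags.foldl (fun d h => d.insert h []) PySem.Dict.empty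
  let virtual := tweets.foldl (fun d t =>
    if PySem.Str.isIn "#" t then
      (pvMatches t lengths tagset).foldl (fun d h => d.modify h [] (fun v => v ++ [t])) d
    else d) virtual0
  virtual.items

-- ===== PRECONDITION & SPEC =====
-- Pre_ excludes hashtag lists with duplicate entries: there A's inner loop appends a matching
-- tweet once per duplicate occurrence of the hashtag, an accidental corner of the dict-key
-- re-seeding, while B's set of hashtags naturally lists each matching tweet once.
def Pre_virtual_documents (tweets : List String) (hashtags : List String) : Prop :=
  hashtags.Nodup
instance (tweets : List String) (hashtags : List String) : Decidable (Pre_virtual_documents tweets hashtags) := by unfold Pre_virtual_documents; infer_instance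

def pvWitness_virtual_documents : List String × List String := (["#a", "b"], ["a", "b"])

def Spec_virtual_documents (tweets : List String) (hashtags : List String) (out : List (String × List String)) : Prop := out = virtual_documents_alt tweets hashtags
instance (tweets : List String) (hashtags : List String) (out : List (String × List String)) : Decidable (Spec_virtual_documents tweets hashtags out) := by unfold Spec_virtual_documents; infer_instance

-- ===== CLAIM (what is proved, stated in full; the proofs are below) =====
def Claim_equal_virtual_documents : Prop := ∀ (tweets : List String) (hashtags : List String), Dom_virtual_documents tweets hashtags → Pre_virtual_documents tweets hashtags → Spec_virtual_documents tweets hashtags (virtual_documents tweets hashtags)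

-- ===== LEMMAS AND PROOFS =====

-- the seeding fold (shared by both ports) keeps a [] default lookup at []
lemma getD_seed (hs : List String) (d : PySem.Dict String (List String)) (k : String)
    (h0 : d.getD k [] = []) :
    (hs.foldl (fun d h => d.insert h []) d).getD k [] = [] := by
  induction hs generalizing d with
  | nil => simpa using h0
  | cons h hs ih =>
    simp only [List.foldl_cons]
    apply ih
    by_cases hk : k = h
    · subst hk; simp [PySem.Dict.getD_insert_self]
    · rw [PySem.Dict.getD_insert_of_ne d [] [] hk]; exact h0

-- A's inner hashtag loop, lookup view
lemma getD_inner (hs : List String) (d : PySem.Dict String (List String))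
    (t : String) (p : String → Bool) (k : String) :
    (hs.foldl (fun d h => if p h then d.modify h [] (fun v => v ++ [t]) else d) d).getD k []
      = d.getD k [] ++ (if p k then List.replicate (hs.count k) t else []) := by
  induction hs generalizing d with
  | nil => simp
  | cons h hs ih =>
    simp only [List.foldl_cons]
    by_cases hph : p h = true
    · rw [if_pos hph, ih]
      by_cases hk : k = h
      · subst hk
        rw [PySem.Dict.getD_modify_self]
        simp [hph, List.replicate_succ, List.append_assoc]
      · rw [PySem.Dict.getD_modify_of_ne d [] _ hk]
        have hcnt : (h :: hs).count k = hs.count k := by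
          simp [Ne.symm hk]
        rw [hcnt]
    · rw [if_neg hph, ih]
      by_cases hk : k = h
      · subst hk
        simp [hph]
      · have hcnt : (h :: hs).count k = hs.count k := by
          simp [Ne.symm hk]
        rw [hcnt]

-- A's outer tweet loop, lookup view
lemma getD_outer (tweets : List String) (hashtags : List String)
    (d : PySem.Dict String (List String)) (k : String) :
    (tweets.foldl (fun d t =>
      if PySem.Str.isIn "#" t then
        hashtags.foldl (fun d h =>
          if PySem.Str.isIn h t then d.modify h [] (fun v => v ++ [t]) else d) d
      else d) d).getD k []
      = d.getD k [] ++
        (tweets.filter (fun t => PySem.Str.isIn "#" t && PySem.Str.isIn k t)).flatMap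
          (fun t => List.replicate (hashtags.count k) t) := by
  induction tweets generalizing d with
  | nil => simp
  | cons t ts ih =>
    simp only [List.foldl_cons, List.filter_cons]
    by_cases hsharp : PySem.Str.isIn "#" t = true
    · rw [if_pos hsharp, ih, getD_inner]
      rw [PySem.Str.isIn_eq, show "#".toList = ['#'] from rfl] at hsharp
      by_cases hkt : PySem.Chars.isIn k.toList t.toList = true
      · simp [hsharp, hkt, List.append_assoc]
      · simp [hsharp, hkt]
    · rw [if_neg hsharp, ih]
      rw [PySem.Str.isIn_eq, show "#".toList = ['#'] from rfl] at hsharp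
      simp [hsharp]

-- A's inner loop never changes the key list when every hashtag is already a key
lemma keys_inner (hs : List String) (d : PySem.Dict String (List String))
    (t : String) (p : String → Bool)
    (hmem : ∀ h ∈ hs, d.contains h = true) :
    (hs.foldl (fun d h => if p h then d.modify h [] (fun v => v ++ [t]) else d) d).keys
      = d.keys := by
  induction hs generalizing d with
  | nil => simp
  | cons h hs ih =>
    simp only [List.foldl_cons]
    by_cases hph : p h = true
    · rw [if_pos hph]
      have hkeys : (d.modify h [] (fun v => v ++ [t])).keys = d.keys := by
        rw [PySem.Dict.keys_modify]
        exact PySem.Dict.keys_insert_of_contains d _ (hmem h (by simp))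
      rw [ih _ (fun h' hh' => by
        rw [PySem.Dict.contains_modify]
        simp [hmem h' (by simp [hh'])]), hkeys]
    · rw [if_neg hph]
      exact ih _ (fun h' hh' => hmem h' (by simp [hh']))

-- A's outer loop never changes the key list when every hashtag is already a key
lemma keys_outer (tweets : List String) (hashtags : List String)
    (d : PySem.Dict String (List String))
    (hmem : ∀ h ∈ hashtags, d.contains h = true) :
    (tweets.foldl (fun d t =>
      if PySem.Str.isIn "#" t then
        hashtags.foldl (fun d h =>
          if PySem.Str.isIn h t then d.modify h [] (fun v => v ++ [t]) else d) d
      else d) d).keys = d.keys := by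
  induction tweets generalizing d with
  | nil => simp
  | cons t ts ih =>
    simp only [List.foldl_cons]
    by_cases hsharp : PySem.Str.isIn "#" t = true
    · rw [if_pos hsharp]
      have hk := keys_inner hashtags d t (fun h => PySem.Str.isIn h t) hmem
      rw [ih _ (fun h hh => by
        rw [PySem.Dict.contains_iff_mem_keys, hk, ← PySem.Dict.contains_iff_mem_keys]
        exact hmem h hh), hk]
    · rw [if_neg hsharp]
      exact ih _ hmem

-- ---- B side ----

-- membership in _matches' inner loop over the hashtag lengths
lemma mem_mfold_inner (ls : List Int) (t : String) (i n : Int)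
    (tagset : PySem.Set String) (m : PySem.Set String) (x : String) :
    x ∈ ls.foldl (fun matched L =>
      if i + L ≤ n ∧ PySem.Set.contains tagset (PySem.Str.slice t (some i) (some (i + L))) = true
      then PySem.Set.add matched (PySem.Str.slice t (some i) (some (i + L)))
      else matched) m
    ↔ x ∈ m ∨ ∃ L ∈ ls, i + L ≤ n ∧
        PySem.Set.contains tagset (PySem.Str.slice t (some i) (some (i + L))) = true ∧
        x = PySem.Str.slice t (some i) (some (i + L)) := by
  induction ls generalizing m with
  | nil => simp
  | cons L ls ih =>
    simp only [List.foldl_cons]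
    split_ifs with hc
    · rw [ih]
      rw [PySem.Set.mem_add]
      constructor
      · rintro ((hm | hx) | ⟨L', hL', h1, h2, h3⟩)
        · exact Or.inl hm
        · exact Or.inr ⟨L, by simp, hc.1, hc.2, hx⟩
        · exact Or.inr ⟨L', by simp [hL'], h1, h2, h3⟩
      · rintro (hm | ⟨L', hL', h1, h2, h3⟩)
        · exact Or.inl (Or.inl hm)
        · rcases List.mem_cons.mp hL' with hL' | hL'
          · subst hL'; exact Or.inl (Or.inr h3)
          · exact Or.inr ⟨L', hL', h1, h2, h3⟩
    · rw [ih]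
      constructor
      · rintro (hm | ⟨L', hL', h1, h2, h3⟩)
        · exact Or.inl hm
        · exact Or.inr ⟨L', by simp [hL'], h1, h2, h3⟩
      · rintro (hm | ⟨L', hL', h1, h2, h3⟩)
        · exact Or.inl hm
        · rcases List.mem_cons.mp hL' with hL' | hL'
          · subst hL'; exact absurd ⟨h1, h2⟩ hc
          · exact Or.inr ⟨L', hL', h1, h2, h3⟩

-- the inner loop keeps the match set duplicate-free
lemma nodup_mfold_inner (ls : List Int) (t : String) (i n : Int)
    (tagset : PySem.Set String) (m : PySem.Set String) (hm : m.Nodup) :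
    (ls.foldl (fun matched L =>
      if i + L ≤ n ∧ PySem.Set.contains tagset (PySem.Str.slice t (some i) (some (i + L))) = true
      then PySem.Set.add matched (PySem.Str.slice t (some i) (some (i + L)))
      else matched) m).Nodup := by
  induction ls generalizing m with
  | nil => exact hm
  | cons L ls ih =>
    simp only [List.foldl_cons]
    split_ifs with hc
    · exact ih _ (PySem.Set.nodup_add m _ hm)
    · exact ih _ hm

-- membership in _matches' outer loop over the positions
lemma mem_mfold_outer (is : List Int) (ls : List Int) (t : String) (n : Int)
    (tagset : PySem.Set String) (m : PySem.Set String) (x : String) :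
    x ∈ is.foldl (fun matched i =>
      ls.foldl (fun matched L =>
        if i + L ≤ n ∧ PySem.Set.contains tagset (PySem.Str.slice t (some i) (some (i + L))) = true
        then PySem.Set.add matched (PySem.Str.slice t (some i) (some (i + L)))
        else matched) matched) m
    ↔ x ∈ m ∨ ∃ i ∈ is, ∃ L ∈ ls, i + L ≤ n ∧
        PySem.Set.contains tagset (PySem.Str.slice t (some i) (some (i + L))) = true ∧
        x = PySem.Str.slice t (some i) (some (i + L)) := by
  induction is generalizing m with
  | nil => simp
  | cons i is ih =>
    simp only [List.foldl_cons]
    rw [ih, mem_mfold_inner]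
    constructor
    · rintro ((hm | ⟨L, hL, h1, h2, h3⟩) | ⟨i', hi', rest⟩)
      · exact Or.inl hm
      · exact Or.inr ⟨i, by simp, L, hL, h1, h2, h3⟩
      · exact Or.inr ⟨i', by simp [hi'], rest⟩
    · rintro (hm | ⟨i', hi', rest⟩)
      · exact Or.inl (Or.inl hm)
      · rcases List.mem_cons.mp hi' with hi' | hi'
        · subst hi'; exact Or.inl (Or.inr rest)
        · exact Or.inr ⟨i', hi', rest⟩

lemma nodup_mfold_outer (is : List Int) (ls : List Int) (t : String) (n : Int)
    (tagset : PySem.Set String) (m : PySem.Set String) (hm : m.Nodup) :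
    (is.foldl (fun matched i =>
      ls.foldl (fun matched L =>
        if i + L ≤ n ∧ PySem.Set.contains tagset (PySem.Str.slice t (some i) (some (i + L))) = true
        then PySem.Set.add matched (PySem.Str.slice t (some i) (some (i + L)))
        else matched) matched) m).Nodup := by
  induction is generalizing m with
  | nil => exact hm
  | cons i is ih => exact ih _ (nodup_mfold_inner ls t i n tagset m hm)

lemma nodup_pvMatches (t : String) (lengths : List Int) (tagset : PySem.Set String) :
    (pvMatches t lengths tagset).Nodup := by
  unfold pvMatches
  exact nodup_mfold_outer _ _ _ _ _ _ List.nodup_nil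

-- every match is one of the hashtags
lemma mem_tagset_of_mem_pvMatches (t : String) (lengths : List Int)
    (tagset : PySem.Set String) (x : String) (hx : x ∈ pvMatches t lengths tagset) :
    x ∈ tagset := by
  unfold pvMatches at hx
  rw [mem_mfold_outer] at hx
  rcases hx with hx | ⟨i, _, L, _, _, hcont, hxeq⟩
  · simp at hx
  · subst hxeq
    exact (PySem.Set.contains_iff tagset _).mp hcont

-- _matches finds exactly the hashtags occurring in a '#'-carrying tweet
lemma mem_pvMatches_iff (t : String) (hashtags : List String) (k : String)
    (hk : k ∈ hashtags) (hsharp : PySem.Str.isIn "#" t = true) :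
    k ∈ pvMatches t (PySem.List.dedup (hashtags.map PySem.Str.len)) (PySem.Set.ofList hashtags)
      ↔ PySem.Str.isIn k t = true := by
  unfold pvMatches
  rw [mem_mfold_outer]
  simp only [PySem.Set.empty, List.not_mem_nil, false_or]
  constructor
  · rintro ⟨i, hi, L, hL, hiL, _, hkeq⟩
    rw [PySem.List.mem_pyRange_one] at hi
    have h0L : (0 : Int) ≤ L := by
      rcases (PySem.List.mem_dedup _ _).mp hL with hL'
      rcases List.mem_map.mp hL' with ⟨h, _, rfl⟩
      rw [PySem.Str.len_eq]; positivity
    have hkl : k.toList = (t.toList.drop i.toNat).take ((i + L).toNat - i.toNat) := by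
      rw [hkeq, PySem.Str.toList_slice, PySem.Chars.slice_eq_listSlice,
        PySem.List.slice_toNat _ hi.1 (by omega)]
    rw [PySem.Str.isIn_eq, PySem.Chars.isIn_iff_infix, hkl]
    exact (List.take_prefix _ _).isInfix.trans (List.drop_suffix _ _).isInfix
  · intro hkt
    have hn : PySem.Str.len t = (t.toList.length : Int) := PySem.Str.len_eq t
    have htne : t.toList ≠ [] := by
      rw [PySem.Str.isIn_eq, PySem.Chars.isIn_iff_infix,
        show "#".toList = ['#'] from rfl] at hsharp
      rintro h; rw [h] at hsharp
      exact absurd (List.eq_nil_of_infix_nil hsharp) (by simp)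
    have htpos : 0 < (t.toList.length : Int) := by
      have := List.length_pos_of_ne_nil htne; exact_mod_cast this
    have hcont : PySem.Set.contains (PySem.Set.ofList hashtags) k = true :=
      (PySem.Set.contains_iff _ _).mpr ((PySem.Set.mem_ofList hashtags k).mpr hk)
    have hLmem : PySem.Str.len k ∈ PySem.List.dedup (hashtags.map PySem.Str.len) :=
      (PySem.List.mem_dedup _ _).mpr (List.mem_map.mpr ⟨k, hk, rfl⟩)
    rw [PySem.Str.isIn_eq, PySem.Chars.isIn_iff_infix] at hkt
    obtain ⟨a, c, hac⟩ := hkt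
    by_cases hkemp : k.toList = []
    · -- the empty hashtag: position 0, length 0
      have hke : k = "" := by rw [← String.toList_inj]; simpa using hkemp
      subst hke
      have hz : PySem.Str.len "" = 0 := by rw [PySem.Str.len_eq]; simp
      have hsl : PySem.Str.slice t (some 0) (some (0 + PySem.Str.len "")) = "" := by
        rw [← String.toList_inj, PySem.Str.toList_slice, PySem.Chars.slice_eq_listSlice,
          show (0 : Int) + PySem.Str.len "" = 0 from by rw [hz]; ring,
          PySem.List.slice_toNat _ le_rfl le_rfl]
        simp
      refine ⟨0, ?_, PySem.Str.len "", hLmem, ?_, ?_, ?_⟩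
      · rw [PySem.List.mem_pyRange_one, hn]; omega
      · rw [hn, hz]; omega
      · rw [hsl]; exact hcont
      · rw [hsl]
    · -- a nonempty hashtag at position a.length
      have hklen : 0 < k.toList.length := List.length_pos_of_ne_nil hkemp
      have hlen : a.length + k.toList.length + c.length = t.toList.length := by
        have h := congrArg List.length hac
        rw [List.length_append, List.length_append] at h
        omega
      have hslice : PySem.Str.slice t (some (a.length : Int))
          (some ((a.length : Int) + PySem.Str.len k)) = k := by
        rw [← String.toList_inj, PySem.Str.toList_slice, PySem.Chars.slice_eq_listSlice,
          PySem.Str.len_eq, PySem.List.slice_natCast_add, ← hac, List.append_assoc,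
          List.drop_left, List.take_left]
      refine ⟨(a.length : Int), ?_, PySem.Str.len k, hLmem, ?_, ?_, ?_⟩
      · rw [PySem.List.mem_pyRange_one, hn]
        constructor
        · positivity
        · exact_mod_cast by omega
      · rw [hn, PySem.Str.len_eq]; exact_mod_cast by omega
      · rwa [hslice]
      · rw [hslice]

-- B's per-tweet append loop over the match set, lookup view
lemma getD_mfold (ms : List String) (hnd : ms.Nodup)
    (d : PySem.Dict String (List String)) (t : String) (k : String) :
    (ms.foldl (fun d h => d.modify h [] (fun v => v ++ [t])) d).getD k []
      = d.getD k [] ++ (if k ∈ ms then [t] else []) := by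
  induction ms generalizing d with
  | nil => simp
  | cons h ms ih =>
    simp only [List.foldl_cons]
    rw [ih (List.Nodup.of_cons hnd)]
    by_cases hk : k = h
    · subst hk
      have hknot : k ∉ ms := (List.nodup_cons.mp hnd).1
      rw [PySem.Dict.getD_modify_self]
      simp [hknot]
    · rw [PySem.Dict.getD_modify_of_ne d [] _ hk]
      simp [List.mem_cons, hk]

-- B's per-tweet append loop never changes the key list when the matches are keys
lemma keys_mfold (ms : List String) (d : PySem.Dict String (List String)) (t : String)
    (hmem : ∀ h ∈ ms, d.contains h = true) :
    (ms.foldl (fun d h => d.modify h [] (fun v => v ++ [t])) d).keys = d.keys := by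
  induction ms generalizing d with
  | nil => simp
  | cons h ms ih =>
    simp only [List.foldl_cons]
    have hkeys : (d.modify h [] (fun v => v ++ [t])).keys = d.keys := by
      rw [PySem.Dict.keys_modify]
      exact PySem.Dict.keys_insert_of_contains d _ (hmem h (by simp))
    rw [ih _ (fun h' hh' => by
      rw [PySem.Dict.contains_modify]
      simp [hmem h' (by simp [hh'])]), hkeys]

-- B's outer tweet loop, lookup view
lemma getD_outer_b (tweets : List String) (lengths : List Int) (tagset : PySem.Set String)
    (d : PySem.Dict String (List String)) (k : String) :
    (tweets.foldl (fun d t =>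
      if PySem.Str.isIn "#" t then
        (pvMatches t lengths tagset).foldl (fun d h => d.modify h [] (fun v => v ++ [t])) d
      else d) d).getD k []
      = d.getD k [] ++
        tweets.filter (fun t => PySem.Str.isIn "#" t && decide (k ∈ pvMatches t lengths tagset)) := by
  induction tweets generalizing d with
  | nil => simp
  | cons t ts ih =>
    simp only [List.foldl_cons, List.filter_cons]
    by_cases hsharp : PySem.Str.isIn "#" t = true
    · rw [if_pos hsharp, ih, getD_mfold _ (nodup_pvMatches t lengths tagset)]
      rw [PySem.Str.isIn_eq, show "#".toList = ['#'] from rfl] at hsharp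
      by_cases hkm : k ∈ pvMatches t lengths tagset
      · simp [hsharp, hkm, List.append_assoc]
      · simp [hsharp, hkm]
    · rw [if_neg hsharp, ih]
      rw [PySem.Str.isIn_eq, show "#".toList = ['#'] from rfl] at hsharp
      simp [hsharp]

-- B's outer tweet loop never changes the key list when every hashtag is a key
lemma keys_outer_b (tweets : List String) (lengths : List Int) (hashtags : List String)
    (d : PySem.Dict String (List String))
    (hmem : ∀ h ∈ hashtags, d.contains h = true) :
    (tweets.foldl (fun d t =>
      if PySem.Str.isIn "#" t then
        (pvMatches t lengths (PySem.Set.ofList hashtags)).foldl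
          (fun d h => d.modify h [] (fun v => v ++ [t])) d
      else d) d).keys = d.keys := by
  induction tweets generalizing d with
  | nil => simp
  | cons t ts ih =>
    simp only [List.foldl_cons]
    by_cases hsharp : PySem.Str.isIn "#" t = true
    · rw [if_pos hsharp]
      have hmem' : ∀ h ∈ pvMatches t lengths (PySem.Set.ofList hashtags), d.contains h = true := by
        intro h hh
        exact hmem h ((PySem.Set.mem_ofList hashtags h).mp
          (mem_tagset_of_mem_pvMatches _ _ _ _ hh))
      have hk := keys_mfold _ d t hmem'
      rw [ih _ (fun h hh => by
        rw [PySem.Dict.contains_iff_mem_keys, hk, ← PySem.Dict.contains_iff_mem_keys]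
        exact hmem h hh), hk]
    · rw [if_neg hsharp]
      exact ih _ hmem

theorem virtual_documents_spec : Claim_equal_virtual_documents := by
  intro tweets hashtags _ hnd
  simp only [Spec_virtual_documents, virtual_documents, virtual_documents_alt]
  -- shared seed facts
  have hseedkeys : (hashtags.foldl (fun d h => d.insert h ([] : List String))
      PySem.Dict.empty).keys = PySem.Set.ofList hashtags := by
    rw [PySem.Dict.keys_foldl_insert hashtags (fun _ _ => ([] : List String)) PySem.Dict.empty]
    rw [PySem.Set.ofList_eq_foldl]
    rfl
  have hofl : PySem.Set.ofList hashtags = hashtags :=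
    PySem.Set.ofList_eq_self_of_nodup hashtags hnd
  have hseedmem : ∀ h ∈ hashtags,
      (hashtags.foldl (fun d h => d.insert h ([] : List String))
        PySem.Dict.empty).contains h = true := by
    intro h hh
    rw [PySem.Dict.contains_iff_mem_keys, hseedkeys, hofl]
    exact hh
  have hseedkeys' : (hashtags.foldl (fun d h => d.insert h ([] : List String))
      PySem.Dict.empty).keys = hashtags := by rw [hseedkeys, hofl]
  -- A side
  have hkeysA := keys_outer tweets hashtags _ hseedmem
  rw [PySem.Dict.items_eq_map_keys _ (by rw [hkeysA, hseedkeys']; exact hnd) [],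
      hkeysA, hseedkeys']
  -- B side
  have hkeysB := keys_outer_b tweets (PySem.List.dedup (hashtags.map PySem.Str.len))
    hashtags _ hseedmem
  rw [PySem.Dict.items_eq_map_keys _ (by rw [hkeysB, hseedkeys']; exact hnd) [],
      hkeysB, hseedkeys']
  apply List.map_congr_left
  intro k hk
  rw [getD_outer, getD_outer_b, getD_seed _ _ _ (by simp [PySem.Dict.getD_empty])]
  have hc1 : hashtags.count k = 1 := List.count_eq_one_of_mem hnd hk
  rw [hc1]
  simp only [List.replicate_one, List.flatMap_singleton', List.nil_append]
  congr 1
  apply List.filter_congr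
  intro t _
  by_cases hsharp : PySem.Str.isIn "#" t = true
  · have hiff := mem_pvMatches_iff t hashtags k hk hsharp
    rw [PySem.List.dedup_eq_ofList] at hiff
    by_cases hkt : PySem.Str.isIn k t = true
    · have hkt' := hkt
      rw [PySem.Str.isIn_eq] at hkt'
      simp [hkt', hiff.mpr hkt]
    · have hnot : k ∉ pvMatches t (PySem.Set.ofList (hashtags.map PySem.Str.len))
          (PySem.Set.ofList hashtags) := fun h => hkt (hiff.mp h)
      simp only [Bool.not_eq_true] at hkt
      rw [PySem.Str.isIn_eq] at hkt
      simp [hkt, hnot]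
  · simp only [Bool.not_eq_true] at hsharp
    rw [PySem.Str.isIn_eq, show "#".toList = ['#'] from rfl] at hsharp
    simp [hsharp]

-- ===== VERDICT (by name: the statement is the Claim_ definition above) =====
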